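-- pv_equiv track=rewrite | github.com/Faksxs/Tomehubnew | apps/backend/services/discovery_page_service.py | _aggregate_page_cache_status
-- ===== SOURCE A (Python) =====
-- def _aggregate_page_cache_status(segment_status: dict[str, str]) -> str:
--     statuses = [status for status in segment_status.values() if status]
--     if not statuses:
--         return "live"
--     if any(status == "stale_cache" for status in statuses):
--         return "partial_stale"
--     if all(status == "fresh_cache" for status in statuses):
--         return "fresh_cache"
--     if any(status == "fresh_cache" for status in statuses):
--         return "mixed_cache"
--     return "live"
-- ===== SOURCE B (Python) =====
-- def _aggregate_page_cache_status(segment_status: dict[str, str]) -> str: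
--     stale = fresh = other = False
--     for s in segment_status.values():
--         if not s:
--             continue
--         if s == "stale_cache":
--             stale = True
--         elif s == "fresh_cache":
--             fresh = True
--         else:
--             other = True
--     if stale:
--         return "partial_stale"
--     if other:
--         return "mixed_cache" if fresh else "live"
--     return "fresh_cache" if fresh else "live"
-- ===== Notes on version B (the rewrite author's own statement) =====
-- stated objective: alternative
-- what changed: Replaced the filtered list plus three separate any/all re-scans with a single pass that maintains three boolean flags (stale/fresh/other seen) and decides the summary from the flags.
import Mathlib
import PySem

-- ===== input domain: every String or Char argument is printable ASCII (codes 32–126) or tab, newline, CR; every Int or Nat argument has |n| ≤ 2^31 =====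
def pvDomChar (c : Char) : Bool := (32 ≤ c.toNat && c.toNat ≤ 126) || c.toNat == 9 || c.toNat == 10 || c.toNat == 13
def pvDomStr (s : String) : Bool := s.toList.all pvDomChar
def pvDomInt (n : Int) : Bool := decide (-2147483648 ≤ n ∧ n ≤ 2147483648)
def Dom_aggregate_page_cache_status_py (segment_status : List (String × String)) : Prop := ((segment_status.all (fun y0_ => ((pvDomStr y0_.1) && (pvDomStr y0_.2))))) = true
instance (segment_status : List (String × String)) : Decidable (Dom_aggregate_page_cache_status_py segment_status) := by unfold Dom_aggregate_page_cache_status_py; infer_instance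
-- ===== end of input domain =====

-- B replaces A's filtered list and three any/all re-scans by one fold keeping three seen-flags (alternative decomposition, same cost class).

-- ===== PORT A =====
def aggregate_page_cache_status_py (segment_status : List (String × String)) : String :=
  let statuses := (segment_status.map (fun kv => kv.2)).filter (fun s => !(s == ""))
  if statuses.isEmpty then "live"
  else if statuses.any (fun s => s == "stale_cache") then "partial_stale"
  else if statuses.all (fun s => s == "fresh_cache") then "fresh_cache"
  else if statuses.any (fun s => s == "fresh_cache") then "mixed_cache"
  else "live"

-- ===== PORT B =====
-- the body of B's loop: update the (stale, fresh, other) seen-flags with one value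
def pvStep (acc : Bool × Bool × Bool) (kv : String × String) : Bool × Bool × Bool :=
  let s := kv.2
  if s == "" then acc
  else if s == "stale_cache" then (true, acc.2.1, acc.2.2)
  else if s == "fresh_cache" then (acc.1, true, acc.2.2)
  else (acc.1, acc.2.1, true)

def aggregate_page_cache_status_py_alt (segment_status : List (String × String)) : String :=
  let flags := segment_status.foldl pvStep (false, false, false)
  if flags.1 then "partial_stale"
  else if flags.2.2 then (if flags.2.1 then "mixed_cache" else "live")
  else if flags.2.1 then "fresh_cache" else "live"

-- ===== PRECONDITION & SPEC =====
def Spec_aggregate_page_cache_status_py (segment_status : List (String × String)) (out : String) : Prop := out = aggregate_page_cache_status_py_alt segment_status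
instance (segment_status : List (String × String)) (out : String) : Decidable (Spec_aggregate_page_cache_status_py segment_status out) := by unfold Spec_aggregate_page_cache_status_py; infer_instance

-- ===== CLAIM (what is proved, stated in full; the proofs are below) =====
def Claim_equal_aggregate_page_cache_status_py : Prop := ∀ (segment_status : List (String × String)), Dom_aggregate_page_cache_status_py segment_status → Spec_aggregate_page_cache_status_py segment_status (aggregate_page_cache_status_py segment_status)

-- ===== LEMMAS AND PROOFS =====

-- the three "seen" predicates on one key/value pair
def pvPst (kv : String × String) : Bool := kv.2 == "stale_cache"
def pvPfr (kv : String × String) : Bool := kv.2 == "fresh_cache"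
def pvPot (kv : String × String) : Bool := !(kv.2 == "") && !(kv.2 == "stale_cache") && !(kv.2 == "fresh_cache")

-- B's fold computes exactly the three "seen" flags
theorem pv_flags_eq (ss : List (String × String)) (a b c : Bool) :
    ss.foldl pvStep (a, b, c) = (a || ss.any pvPst, b || ss.any pvPfr, c || ss.any pvPot) := by
  induction ss generalizing a b c with
  | nil => simp
  | cons kv t ih =>
    rw [List.foldl_cons]
    by_cases h0 : kv.2 = ""
    · have hs : pvStep (a, b, c) kv = (a, b, c) := by simp [pvStep, h0]
      rw [hs, ih]
      simp [List.any_cons, pvPst, pvPfr, pvPot, h0]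
    · by_cases h1 : kv.2 = "stale_cache"
      · have hs : pvStep (a, b, c) kv = (true, b, c) := by simp [pvStep, h0, h1]
        rw [hs, ih]
        simp [List.any_cons, pvPst, pvPfr, pvPot, h0, h1]
      · by_cases h2 : kv.2 = "fresh_cache"
        · have hs : pvStep (a, b, c) kv = (a, true, c) := by simp [pvStep, h0, h1, h2]
          rw [hs, ih]
          simp [List.any_cons, pvPst, pvPfr, pvPot, h0, h1, h2, Bool.or_left_comm, Bool.or_comm]
        · have hs : pvStep (a, b, c) kv = (a, b, true) := by simp [pvStep, h0, h1, h2]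
          have hb1 : (kv.2 == "stale_cache") = false := by simp [h1]
          have hb2 : (kv.2 == "fresh_cache") = false := by simp [h2]
          rw [hs, ih]
          simp [List.any_cons, pvPst, pvPfr, pvPot, hb1, hb2, Bool.or_left_comm, Bool.or_comm]
          exact Or.inr (Or.inl h0)

-- A's four tests on the filtered list, expressed through the same three flags
theorem pv_A_stale (ss : List (String × String)) :
    ((ss.map (fun kv => kv.2)).filter (fun s => !(s == ""))).any (fun s => s == "stale_cache")
      = ss.any pvPst := by
  induction ss with
  | nil => simp
  | cons kv t ih =>
    by_cases h0 : kv.2 = "" <;> simp [h0, ih, pvPst]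

theorem pv_A_fresh (ss : List (String × String)) :
    ((ss.map (fun kv => kv.2)).filter (fun s => !(s == ""))).any (fun s => s == "fresh_cache")
      = ss.any pvPfr := by
  induction ss with
  | nil => simp
  | cons kv t ih =>
    by_cases h0 : kv.2 = "" <;> simp [h0, ih, pvPfr]

theorem pv_A_all (ss : List (String × String)) :
    ((ss.map (fun kv => kv.2)).filter (fun s => !(s == ""))).all (fun s => s == "fresh_cache")
      = (!(ss.any pvPst) && !(ss.any pvPot)) := by
  induction ss with
  | nil => simp
  | cons kv t ih =>
    by_cases h0 : kv.2 = ""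
    · simp [h0, ih, pvPst, pvPot]
    · by_cases h1 : kv.2 = "stale_cache"
      · simp [h0, h1, ih, pvPst, pvPot]
      · have hb0 : (kv.2 == "") = false := by simp [h0]
        have hb1 : (kv.2 == "stale_cache") = false := by simp [h1]
        by_cases h2 : kv.2 = "fresh_cache" <;>
          simp [h0, h1, h2, hb0, hb1, ih, pvPst, pvPot, Bool.and_left_comm, Bool.and_comm, Bool.and_assoc]

theorem pv_A_empty (ss : List (String × String)) :
    ((ss.map (fun kv => kv.2)).filter (fun s => !(s == ""))).isEmpty
      = (!(ss.any pvPst) && !(ss.any pvPfr) && !(ss.any pvPot)) := by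
  induction ss with
  | nil => simp
  | cons kv t ih =>
    by_cases h0 : kv.2 = ""
    · simp [h0, ih, pvPst, pvPfr, pvPot]
    · by_cases h1 : kv.2 = "stale_cache"
      · simp [h0, h1, ih, pvPst, pvPfr, pvPot]
      · have hb0 : (kv.2 == "") = false := by simp [h0]
        have hb1 : (kv.2 == "stale_cache") = false := by simp [h1]
        by_cases h2 : kv.2 = "fresh_cache" <;>
          simp [h0, h1, h2, hb0, hb1, ih, pvPst, pvPfr, pvPot, Bool.and_left_comm, Bool.and_comm, Bool.and_assoc]

-- ===== VERDICT (by name: the statement is the Claim_ definition above) =====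
theorem aggregate_page_cache_status_py_spec : Claim_equal_aggregate_page_cache_status_py := by
  intro ss _
  show aggregate_page_cache_status_py ss = aggregate_page_cache_status_py_alt ss
  unfold aggregate_page_cache_status_py aggregate_page_cache_status_py_alt
  simp only [pv_A_stale, pv_A_fresh, pv_A_all, pv_A_empty, pv_flags_eq, Bool.false_or]
  cases hst : ss.any pvPst <;> cases hfr : ss.any pvPfr <;> cases hot : ss.any pvPot <;> rfl
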